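-- pv_equiv track=rewrite | github.com/Kapusbenjamin/KepFeldolgozas_Szakdolgozat | PythonScripts/Text.py | is_similar
-- ===== SOURCE A (Python) =====
-- def is_similar(actual: str, expected: str, similar_chars: dict) -> bool:
--     actual = actual.upper().strip()
--     expected = expected.upper().strip()
--
--     if(len(actual) < len(expected)):
--         return False
--
--     def char_equal(a, e):
--         if a == e:
--             return True
--         if e in similar_chars and a in similar_chars[e]:
--             return True
--         if a in similar_chars and e in similar_chars[a]:
--             return True
--         return False
--
--     # find expected in actual with similar chars
--     for i in range(len(actual) - len(expected) + 1):
--         match = True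
--         for j in range(len(expected)):
--             if not char_equal(actual[i + j], expected[j]):
--                 match = False
--                 break
--         if match:
--             return True
--     return False
-- ===== SOURCE B (Python) =====
-- def is_similar(actual: str, expected: str, similar_chars: dict) -> bool:
--     actual = actual.upper().strip()
--     expected = expected.upper().strip()
--
--     m = len(expected)
--     if m == 0:
--         return True
--     if len(actual) < m:
--         return False
--
--     # Equivalence class of each distinct expected character.
--     classes = {}
--     for ch in set(expected):
--         cls = {ch}
--         cls.update(c for c in similar_chars.get(ch, ()) if len(c) == 1)
--         for k, v in similar_chars.items():
--             if len(k) == 1 and ch in v: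
--                 cls.add(k)
--         classes[ch] = cls
--
--     # Shift-And (bitap): per character, a bitmask of the expected positions
--     # whose equivalence class contains it.
--     masks = {}
--     for j, ch in enumerate(expected):
--         bit = 1 << j
--         for c in classes[ch]:
--             masks[c] = masks.get(c, 0) | bit
--
--     goal = 1 << (m - 1)
--     state = 0
--     for c in actual:
--         state = ((state << 1) | 1) & masks.get(c, 0)
--         if state & goal:
--             return True
--     return False
-- ===== Notes on version B (the rewrite author's own statement) =====
-- stated objective: alternative
-- what changed: Replaces A's nested scan (for every start position, compare each expected character by probing the similar_chars dict up to three times) with the Shift-And (bitap) algorithm: equivalence classes are precomputed once per distinct expected character, turned into per-character bitmasks of matching expected positions, and a single bit-parallel match state is slid over the text in one pass.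
import Mathlib
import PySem

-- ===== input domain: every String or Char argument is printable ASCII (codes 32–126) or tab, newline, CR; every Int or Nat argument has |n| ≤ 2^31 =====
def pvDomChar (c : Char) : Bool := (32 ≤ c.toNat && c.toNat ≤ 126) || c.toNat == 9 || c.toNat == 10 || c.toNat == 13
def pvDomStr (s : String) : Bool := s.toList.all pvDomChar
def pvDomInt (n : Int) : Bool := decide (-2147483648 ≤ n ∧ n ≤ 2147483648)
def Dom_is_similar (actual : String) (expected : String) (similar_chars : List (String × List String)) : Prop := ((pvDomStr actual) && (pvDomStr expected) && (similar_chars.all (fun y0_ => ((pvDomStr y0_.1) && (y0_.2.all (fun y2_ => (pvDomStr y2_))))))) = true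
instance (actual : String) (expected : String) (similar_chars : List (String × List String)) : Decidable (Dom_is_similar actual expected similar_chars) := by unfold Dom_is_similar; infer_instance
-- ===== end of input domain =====

-- ===== PORT A =====
-- B re-implements A's O(n*m) scan with dict probes per comparison as a Shift-And (bitap)
-- scan over precomputed per-position character-class bitmasks; return values proved equal.

-- char_equal(a, e) of A (similar_chars used with Python-dict lookup semantics)
def pvCharEqual (d : PySem.Dict String (List String)) (a : Char) (e : Char) : Bool :=
  if a == e then true
  else if (match d.get? (String.ofList [e]) with
           | some v => v.contains (String.ofList [a])
           | none => false) then true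
  else if (match d.get? (String.ofList [a]) with
           | some v => v.contains (String.ofList [e])
           | none => false) then true
  else false

def is_similar (actual : String) (expected : String) (similar_chars : List (String × List String)) : Bool :=
  let a := PySem.Chars.strip (PySem.Chars.upper actual.toList)
  let e := PySem.Chars.strip (PySem.Chars.upper expected.toList)
  if (a.length : Int) < (e.length : Int) then false
  else
    let d := PySem.Dict.ofList similar_chars
    (PySem.List.pyRange 0 ((a.length : Int) - (e.length : Int) + 1) 1).any (fun i =>
      (PySem.List.pyRange 0 ((e.length : Int)) 1).all (fun j =>
        pvCharEqual d (PySem.List.pyGetD a (i + j) ' ') (PySem.List.pyGetD e j ' ')))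

-- ===== PORT B =====
-- equivalence class of an expected character (the set cls built per position in Source B)
def pvClassOf (d : PySem.Dict String (List String)) (ch : Char) : PySem.Set String :=
  let cls0 : PySem.Set String := PySem.Set.ofList [String.ofList [ch]]
  let cls1 := PySem.Set.update cls0 ((d.getD (String.ofList [ch]) []).filter (fun c => c.toList.length == 1))
  d.items.foldl
    (fun s kv => if kv.1.toList.length == 1 && kv.2.contains (String.ofList [ch]) then PySem.Set.add s kv.1 else s)
    cls1

-- the classes dict of Source B: equivalence class per distinct expected character
def pvClasses (d : PySem.Dict String (List String)) (e : List Char) : PySem.Dict Char (PySem.Set String) :=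
  (PySem.Set.ofList e).foldl (fun cd ch => cd.insert ch (pvClassOf d ch)) PySem.Dict.empty

-- per-character bitmasks (the masks dict of Source B)
def pvMasks (classes : PySem.Dict Char (PySem.Set String)) (e : List Char) : PySem.Dict String Nat :=
  e.zipIdx.foldl
    (fun masks p =>
      let bit : Nat := 1 <<< p.2
      (classes.getD p.1 []).foldl (fun ms c => ms.insert c (ms.getD c 0 ||| bit)) masks)
    PySem.Dict.empty

-- the Shift-And scan loop of Source B (early return when the goal bit fires)
def pvScan (masks : PySem.Dict String Nat) (goal : Nat) : Nat → List Char → Bool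
  | _, [] => false
  | st, c :: rest =>
    let st' := ((st <<< 1) ||| 1) &&& masks.getD (String.ofList [c]) 0
    if st' &&& goal ≠ 0 then true else pvScan masks goal st' rest

def is_similar_alt (actual : String) (expected : String) (similar_chars : List (String × List String)) : Bool :=
  let a := PySem.Chars.strip (PySem.Chars.upper actual.toList)
  let e := PySem.Chars.strip (PySem.Chars.upper expected.toList)
  if e.length = 0 then true
  else if a.length < e.length then false
  else
    let d := PySem.Dict.ofList similar_chars
    let classes := pvClasses d e
    pvScan (pvMasks classes e) (1 <<< (e.length - 1)) 0 a

-- ===== PRECONDITION & SPEC =====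
def Spec_is_similar (actual : String) (expected : String) (similar_chars : List (String × List String)) (out : Bool) : Prop := out = is_similar_alt actual expected similar_chars
instance (actual : String) (expected : String) (similar_chars : List (String × List String)) (out : Bool) : Decidable (Spec_is_similar actual expected similar_chars out) := by unfold Spec_is_similar; infer_instance

-- ===== CLAIM (what is proved, stated in full; the proofs are below) =====
def Claim_equal_is_similar : Prop := ∀ (actual : String) (expected : String) (similar_chars : List (String × List String)), Dom_is_similar actual expected similar_chars → Spec_is_similar actual expected similar_chars (is_similar actual expected similar_chars)

-- ===== LEMMAS AND PROOFS =====

-- L1: inner mask fold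
theorem pv_maskfold_getD (cls : List String) (bit : Nat) :
    ∀ (ms : PySem.Dict String Nat) (key : String),
    ((cls.foldl (fun ms c => ms.insert c (ms.getD c 0 ||| bit)) ms).getD key 0)
      = ms.getD key 0 ||| (if key ∈ cls then bit else 0) := by
  induction cls with
  | nil => intro ms key; simp
  | cons c cs ih =>
    intro ms key
    simp only [List.foldl_cons, ih, PySem.Dict.getD_insert, List.mem_cons]
    by_cases hkc : key = c
    · subst hkc
      simp only [true_or, if_pos]
      by_cases hcs : key ∈ cs
      · rw [if_pos hcs, Nat.or_assoc, Nat.or_self]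
      · rw [if_neg hcs, Nat.or_zero]
    · rw [if_neg hkc]
      by_cases hcs : key ∈ cs
      · rw [if_pos hcs, if_pos (Or.inr hcs)]
      · rw [if_neg hcs, if_neg (by tauto)]

-- classes lookups: getD of a "for x: cd[x] = f(x)" fold
theorem pv_foldl_insert_getD_of_not_mem (f : Char → PySem.Set String) (l : List Char)
    (key : Char) (hkey : key ∉ l) :
    ∀ cd0 : PySem.Dict Char (PySem.Set String),
    (l.foldl (fun cd x => cd.insert x (f x)) cd0).getD key [] = cd0.getD key [] := by
  induction l with
  | nil => intro cd0; rfl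
  | cons x xs ih =>
    intro cd0
    simp only [List.mem_cons, not_or] at hkey
    rw [List.foldl_cons, ih hkey.2, PySem.Dict.getD_insert, if_neg hkey.1]

theorem pv_foldl_insert_getD_of_mem (f : Char → PySem.Set String) (l : List Char)
    (key : Char) (hkey : key ∈ l) :
    ∀ cd0 : PySem.Dict Char (PySem.Set String),
    (l.foldl (fun cd x => cd.insert x (f x)) cd0).getD key [] = f key := by
  induction l with
  | nil => cases hkey
  | cons x xs ih =>
    intro cd0
    rw [List.foldl_cons]
    by_cases hx : key ∈ xs
    · exact ih hx _
    · have hkx : key = x := by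
        rcases List.mem_cons.mp hkey with h | h
        · exact h
        · exact absurd h hx
      subst hkx
      rw [pv_foldl_insert_getD_of_not_mem f xs key hx, PySem.Dict.getD_insert, if_pos rfl]

theorem pv_classes_getD (d : PySem.Dict String (List String)) (e : List Char) (ch : Char)
    (h : ch ∈ e) : (pvClasses d e).getD ch [] = pvClassOf d ch :=
  pv_foldl_insert_getD_of_mem (pvClassOf d) (PySem.Set.ofList e) ch
    ((PySem.Set.mem_ofList e ch).mpr h) _

-- L2: mask bits
theorem pv_masks_testBit_aux (d : PySem.Dict String (List String)) (e : List Char)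
    (classes : PySem.Dict Char (PySem.Set String))
    (hcl : ∀ ch ∈ e, classes.getD ch [] = pvClassOf d ch) (key : String) (j : Nat) :
    ((pvMasks classes e).getD key 0).testBit j
      = (decide (j < e.length) && decide (key ∈ pvClassOf d (e.getD j ' '))) := by
  induction e using List.reverseRecOn with
  | nil => simp [pvMasks, PySem.Dict.getD_empty, Nat.zero_testBit]
  | append_singleton e ch ih =>
    have hcl' : ∀ c ∈ e, classes.getD c [] = pvClassOf d c := fun c hc =>
      hcl c (List.mem_append.mpr (Or.inl hc))
    have ih := ih hcl'
    have h1 : pvMasks classes (e ++ [ch])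
        = (pvClassOf d ch).foldl
            (fun ms c => ms.insert c (ms.getD c 0 ||| (1 <<< e.length))) (pvMasks classes e) := by
      simp only [pvMasks, List.zipIdx_append, List.foldl_append, List.zipIdx,
        List.foldl_cons, List.foldl_nil, Nat.zero_add]
      rw [hcl ch (List.mem_append.mpr (Or.inr (List.mem_singleton.mpr rfl)))]
    have hbit : ∀ b : Prop, [Decidable b] → ∀ (_ : j ≠ e.length),
        (if b then 1 <<< e.length else 0).testBit j = false := by
      intro b _ hne
      split
      · rw [Nat.one_shiftLeft, Nat.testBit_two_pow]; simp [Ne.symm hne]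
      · exact Nat.zero_testBit j
    rw [h1, pv_maskfold_getD, Nat.testBit_or, ih]
    rcases lt_trichotomy j e.length with hj | hj | hj
    · rw [hbit _ (by omega), List.getD_append _ _ _ _ hj, Bool.or_false]
      have : decide (j < e.length) = true := by simp [hj]
      have h2 : decide (j < (e ++ [ch]).length) = true := by simp; omega
      rw [this, h2]
    · subst hj
      have hg : (e ++ [ch]).getD e.length ' ' = ch := by
        rw [List.getD_append_right _ _ _ _ le_rfl]; simp
      rw [hg]
      have h0 : decide (e.length < e.length) = false := by simp
      have h2 : decide (e.length < (e ++ [ch]).length) = true := by simp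
      rw [h0, h2, Bool.false_and, Bool.false_or, Bool.true_and]
      split
      · rename_i hmem
        rw [Nat.one_shiftLeft, Nat.testBit_two_pow]
        simp [hmem]
      · rename_i hmem
        rw [Nat.zero_testBit]
        simp [hmem]
    · rw [hbit _ (by omega), Bool.or_false]
      have h0 : decide (j < e.length) = false := by simp; omega
      have h2 : decide (j < (e ++ [ch]).length) = false := by simp; omega
      rw [h0, h2, Bool.false_and, Bool.false_and]

-- L3a: membership in a conditional-add fold
theorem pv_mem_foldl_if_add (l : List (String × List String)) (p : String × List String → Bool)
    (y : String) : ∀ (s0 : PySem.Set String),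
    (y ∈ l.foldl (fun s kv => if p kv then PySem.Set.add s kv.1 else s) s0)
      ↔ y ∈ s0 ∨ ∃ kv ∈ l, p kv = true ∧ y = kv.1 := by
  induction l with
  | nil => intro s0; simp
  | cons kv l ih =>
    intro s0
    simp only [List.foldl_cons, List.mem_cons]
    by_cases hp : p kv = true
    · rw [if_pos hp, ih, PySem.Set.mem_add]
      constructor
      · rintro (⟨h | h⟩ | ⟨kv', h1, h2, h3⟩)
        · exact Or.inl h
        · exact Or.inr ⟨kv, Or.inl rfl, hp, h⟩
        · exact Or.inr ⟨kv', Or.inr h1, h2, h3⟩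
      · rintro (h | ⟨kv', (rfl | h1), h2, h3⟩)
        · exact Or.inl (Or.inl h)
        · exact Or.inl (Or.inr h3)
        · exact Or.inr ⟨kv', h1, h2, h3⟩
    · rw [if_neg hp, ih]
      constructor
      · rintro (h | ⟨kv', h1, h2, h3⟩)
        · exact Or.inl h
        · exact Or.inr ⟨kv', Or.inr h1, h2, h3⟩
      · rintro (h | ⟨kv', (rfl | h1), h2, h3⟩)
        · exact Or.inl h
        · exact absurd h2 hp
        · exact Or.inr ⟨kv', h1, h2, h3⟩

-- L3: class membership is char_equal
theorem pv_mem_classOf (d : PySem.Dict String (List String)) (hd : d.keys.Nodup) (ch c : Char) :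
    (String.ofList [c] ∈ pvClassOf d ch) ↔ pvCharEqual d c ch = true := by
  unfold pvClassOf
  rw [pv_mem_foldl_if_add, PySem.Set.mem_update, PySem.Set.mem_ofList]
  have hinj : ∀ x y : Char, String.ofList [x] = String.ofList [y] ↔ x = y := by
    intro x y
    constructor
    · intro h; have := congrArg String.toList h; simpa using this
    · rintro rfl; rfl
  have hitems : (∃ kv ∈ d.items, (kv.1.toList.length == 1 && kv.2.contains (String.ofList [ch])) = true
        ∧ String.ofList [c] = kv.1)
      ↔ (match d.get? (String.ofList [c]) with
          | some v => v.contains (String.ofList [ch])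
          | none => false) = true := by
    constructor
    · rintro ⟨kv, hmem, hp, hy⟩
      have hget : d.get? kv.1 = some kv.2 :=
        (PySem.Dict.get?_eq_some_iff_mem_items d kv.1 kv.2 hd).mpr (by cases kv; exact hmem)
      rw [← hy] at hget
      rw [hget]
      simp only [Bool.and_eq_true] at hp
      exact hp.2
    · intro h
      cases hg2 : d.get? (String.ofList [c]) with
      | none => rw [hg2] at h; simp at h
      | some w =>
        rw [hg2] at h
        have h2 : w.contains (String.ofList [ch]) = true := h
        exact ⟨(String.ofList [c], w),
          (PySem.Dict.get?_eq_some_iff_mem_items d _ w hd).mp hg2,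
          by simp only [Bool.and_eq_true]; exact ⟨by simp, h2⟩, rfl⟩
  have hfilter : (String.ofList [c] ∈ (d.getD (String.ofList [ch]) []).filter (fun s => s.toList.length == 1))
      ↔ (match d.get? (String.ofList [ch]) with
          | some v => v.contains (String.ofList [c])
          | none => false) = true := by
    rw [List.mem_filter, PySem.Dict.getD_eq_get?_getD]
    cases hg : d.get? (String.ofList [ch]) with
    | none => simp
    | some v => simp
  rw [hitems, hfilter]
  unfold pvCharEqual
  by_cases hc : (c == ch) = true
  · simp only [hc, if_true, List.mem_singleton, iff_true]
    exact Or.inl (Or.inl ((hinj c ch).mpr (by simpa using hc)))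
  · simp only [hc, Bool.false_eq_true, if_false, List.mem_singleton]
    have hne : ¬ String.ofList [c] = String.ofList [ch] := by
      rw [hinj]; simpa using hc
    constructor
    · rintro ((h | h) | h)
      · exact absurd h hne
      · rw [if_pos h]
      · by_cases h2 : (match d.get? (String.ofList [ch]) with
            | some v => v.contains (String.ofList [c])
            | none => false) = true
        · rw [if_pos h2]
        · rw [if_neg h2, if_pos h]
    · intro h
      by_cases h2 : (match d.get? (String.ofList [ch]) with
          | some v => v.contains (String.ofList [c])
          | none => false) = true
      · exact Or.inl (Or.inr h2)
      · rw [if_neg h2] at h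
        by_cases h3 : (match d.get? (String.ofList [c]) with
            | some v => v.contains (String.ofList [ch])
            | none => false) = true
        · exact Or.inr h3
        · rw [if_neg h3] at h
          simp at h

abbrev pvC (d : PySem.Dict String (List String)) (a e : List Char) (i j : Nat) : Prop :=
  pvCharEqual d (a.getD i ' ') (e.getD j ' ') = true

def pvInv (d : PySem.Dict String (List String)) (a e : List Char) (p st : Nat) : Prop :=
  ∀ j, st.testBit j = true ↔
    (j < e.length ∧ j + 1 ≤ p ∧ ∀ t, t ≤ j → pvC d a e (p - 1 - j + t) t)

theorem pv_testBit_one (j : Nat) : Nat.testBit 1 j = decide (j = 0) := by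
  have := @Nat.testBit_two_pow 0 j
  simp only [pow_zero] at this
  rw [this]
  by_cases h : j = 0 <;> simp [h, Ne.symm]

theorem pv_step (d : PySem.Dict String (List String)) (hd : d.keys.Nodup) (a e : List Char)
    (p st : Nat) (h : pvInv d a e p st) :
    pvInv d a e (p + 1)
      (((st <<< 1) ||| 1) &&& (pvMasks (pvClasses d e) e).getD (String.ofList [a.getD p ' ']) 0) := by
  intro j
  rw [Nat.testBit_and, Nat.testBit_or, Nat.testBit_shiftLeft,
      pv_masks_testBit_aux d e (pvClasses d e) (fun c hc => pv_classes_getD d e c hc),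
      pv_testBit_one]
  rw [show (decide (j < e.length) &&
        decide (String.ofList [a.getD p ' '] ∈ pvClassOf d (e.getD j ' ')))
      = (decide (j < e.length) && decide (pvC d a e p j)) by
    by_cases hm : pvC d a e p j
    · rw [decide_eq_true ((pv_mem_classOf d hd _ _).mpr hm), decide_eq_true hm]
    · rw [decide_eq_false (fun hmem => hm ((pv_mem_classOf d hd _ _).mp hmem)),
          decide_eq_false hm]]
  by_cases hj0 : j = 0
  · subst hj0
    simp only [ge_iff_le, Nat.le_zero]
    constructor
    · intro hb
      simp only [Bool.and_eq_true, Bool.or_eq_true, decide_eq_true_eq] at hb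
      refine ⟨hb.2.1, by omega, ?_⟩
      intro t ht
      have : t = 0 := by omega
      subst this
      have : p + 1 - 1 - 0 + 0 = p := by omega
      rw [this]
      exact hb.2.2
    · rintro ⟨h1, _, h3⟩
      have := h3 0 rfl
      have heq : p + 1 - 1 - 0 + 0 = p := by omega
      rw [heq] at this
      simp only [Bool.or_eq_true, Bool.and_eq_true, decide_eq_true_eq]
      exact ⟨Or.inr trivial, h1, this⟩
  · have hj1 : 1 ≤ j := by omega
    simp only [Bool.and_eq_true, Bool.or_eq_true, decide_eq_true_eq]
    rw [h (j - 1)]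
    constructor
    · rintro ⟨hleft, hjm, hcj⟩
      rcases hleft with ⟨-, hj2, hjp, hall⟩ | h0
      · refine ⟨hjm, by omega, ?_⟩
        intro t ht
        by_cases htj : t = j
        · subst htj
          have heq : p + 1 - 1 - t + t = p := by omega
          rw [heq]; exact hcj
        · have ht' : t ≤ j - 1 := by omega
          have := hall t ht'
          have heq : p - 1 - (j - 1) + t = p + 1 - 1 - j + t := by omega
          rw [heq] at this
          exact this
      · omega
    · rintro ⟨h1, h2, h3⟩
      refine ⟨Or.inl ⟨by omega, by omega, by omega, ?_⟩, h1, ?_⟩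
      · intro t ht
        have := h3 t (by omega)
        have heq : p + 1 - 1 - j + t = p - 1 - (j - 1) + t := by omega
        rw [heq] at this
        exact this
      · have := h3 j le_rfl
        have heq : p + 1 - 1 - j + j = p := by omega
        rw [heq] at this
        exact this

theorem pv_and_shift_ne_zero (x k : Nat) : (x &&& (1 <<< k) ≠ 0) ↔ x.testBit k = true := by
  rw [Nat.one_shiftLeft, Nat.and_two_pow]
  cases h : x.testBit k <;> simp

theorem pv_scan_iff (d : PySem.Dict String (List String)) (hd : d.keys.Nodup)
    (a e : List Char) (hm : 1 ≤ e.length) :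
    ∀ (rest : List Char) (p st : Nat), a.drop p = rest → pvInv d a e p st →
    (pvScan (pvMasks (pvClasses d e) e) (1 <<< (e.length - 1)) st rest = true ↔
      ∃ q, p ≤ q ∧ q < a.length ∧ e.length ≤ q + 1 ∧
        ∀ t, t < e.length → pvC d a e (q + 1 - e.length + t) t) := by
  intro rest
  induction rest with
  | nil =>
    intro p st hdrop _
    rw [List.drop_eq_nil_iff] at hdrop
    simp only [pvScan]
    constructor
    · intro h; exact absurd h (by simp)
    · rintro ⟨q, h1, h2, -⟩; omega
  | cons c rest ih =>
    intro p st hdrop hinv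
    have hp : p < a.length := by
      by_contra hge
      rw [List.drop_eq_nil_iff.mpr (by omega)] at hdrop
      exact List.cons_ne_nil _ _ hdrop.symm
    have hc : a.getD p ' ' = c := by
      have h0 : a[p]? = some c := by
        have : (List.drop p a)[0]? = a[p + 0]? := List.getElem?_drop
        rw [hdrop] at this
        simpa using this.symm
      simp [List.getD, h0]
    have hdrop' : a.drop (p + 1) = rest := by
      have : a.drop (p + 1) = (a.drop p).drop 1 := by
        rw [List.drop_drop]
      rw [this, hdrop]
      rfl
    have hinv' : pvInv d a e (p + 1)
        (((st <<< 1) ||| 1) &&& (pvMasks (pvClasses d e) e).getD (String.ofList [c]) 0) := by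
      rw [← hc]
      exact pv_step d hd a e p st hinv
    show (if ((st <<< 1) ||| 1) &&& (pvMasks (pvClasses d e) e).getD (String.ofList [c]) 0 &&& (1 <<< (e.length - 1)) ≠ 0
        then true
        else pvScan (pvMasks (pvClasses d e) e) (1 <<< (e.length - 1))
          (((st <<< 1) ||| 1) &&& (pvMasks (pvClasses d e) e).getD (String.ofList [c]) 0) rest) = true ↔ _
    by_cases hgoal : ((st <<< 1) ||| 1) &&& (pvMasks (pvClasses d e) e).getD (String.ofList [c]) 0 &&& (1 <<< (e.length - 1)) ≠ 0
    · rw [if_pos hgoal]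
      rw [pv_and_shift_ne_zero] at hgoal
      obtain ⟨-, h2, h3⟩ := (hinv' (e.length - 1)).mp hgoal
      simp only [true_iff]
      refine ⟨p, le_rfl, hp, by omega, ?_⟩
      intro t ht
      have := h3 t (by omega)
      have heq : p + 1 - 1 - (e.length - 1) + t = p + 1 - e.length + t := by omega
      rw [heq] at this
      exact this
    · rw [if_neg hgoal]
      rw [ih (p + 1) _ hdrop' hinv']
      rw [pv_and_shift_ne_zero] at hgoal
      rw [Bool.not_eq_true] at hgoal
      have hnotp : ¬ (e.length ≤ p + 1 ∧ ∀ t, t < e.length → pvC d a e (p + 1 - e.length + t) t) := by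
        rintro ⟨hle, hall⟩
        have : (((st <<< 1) ||| 1) &&& (pvMasks (pvClasses d e) e).getD (String.ofList [c]) 0).testBit (e.length - 1) = true := by
          rw [hinv' (e.length - 1)]
          refine ⟨by omega, by omega, ?_⟩
          intro t ht
          have := hall t (by omega)
          have heq : p + 1 - e.length + t = p + 1 - 1 - (e.length - 1) + t := by omega
          rw [heq] at this
          exact this
        rw [this] at hgoal
        cases hgoal
      constructor
      · rintro ⟨q, h1, h2, h3, h4⟩
        exact ⟨q, by omega, h2, h3, h4⟩
      · rintro ⟨q, h1, h2, h3, h4⟩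
        by_cases hq : q = p
        · subst hq
          exact absurd ⟨h3, h4⟩ hnotp
        · exact ⟨q, by omega, h2, h3, h4⟩

theorem pv_any_iff (d : PySem.Dict String (List String)) (a e : List Char) :
    (((PySem.List.pyRange 0 ((a.length : Int) - (e.length : Int) + 1) 1).any (fun i =>
        (PySem.List.pyRange 0 ((e.length : Int)) 1).all (fun j =>
          pvCharEqual d (PySem.List.pyGetD a (i + j) ' ') (PySem.List.pyGetD e j ' ')))) = true)
    ↔ ∃ i : Nat, (i : Int) ≤ (a.length : Int) - (e.length : Int) ∧
        ∀ t, t < e.length → pvC d a e (i + t) t := by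
  rw [List.any_eq_true]
  constructor
  · rintro ⟨x, hx, hall⟩
    rw [PySem.List.mem_pyRange_one] at hx
    obtain ⟨i, rfl⟩ : ∃ i : Nat, (i : Int) = x := ⟨x.toNat, Int.toNat_of_nonneg hx.1⟩
    refine ⟨i, by omega, ?_⟩
    intro t ht
    rw [List.all_eq_true] at hall
    have := hall (t : Int) (by rw [PySem.List.mem_pyRange_one]; constructor <;> [omega; exact_mod_cast ht])
    rw [show ((i : Int) + (t : Int)) = ((i + t : Nat) : Int) by push_cast; ring] at this
    rw [PySem.List.pyGetD_natCast, PySem.List.pyGetD_natCast] at this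
    exact this
  · rintro ⟨i, hi, hall⟩
    refine ⟨(i : Int), ?_, ?_⟩
    · rw [PySem.List.mem_pyRange_one]; omega
    · rw [List.all_eq_true]
      intro j hj
      rw [PySem.List.mem_pyRange_one] at hj
      obtain ⟨t, rfl⟩ : ∃ t : Nat, (t : Int) = j := ⟨j.toNat, Int.toNat_of_nonneg hj.1⟩
      rw [show ((i : Int) + (t : Int)) = ((i + t : Nat) : Int) by push_cast; ring]
      rw [PySem.List.pyGetD_natCast, PySem.List.pyGetD_natCast]
      exact hall t (by omega)

theorem pv_inv_zero (d : PySem.Dict String (List String)) (a e : List Char) :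
    pvInv d a e 0 0 := by
  intro j
  rw [Nat.zero_testBit]
  constructor
  · intro h; cases h
  · rintro ⟨-, h2, -⟩; omega

theorem pv_main (d : PySem.Dict String (List String)) (hd : d.keys.Nodup) (a e : List Char) :
    (if (a.length : Int) < (e.length : Int) then false
     else (PySem.List.pyRange 0 ((a.length : Int) - (e.length : Int) + 1) 1).any (fun i =>
        (PySem.List.pyRange 0 ((e.length : Int)) 1).all (fun j =>
          pvCharEqual d (PySem.List.pyGetD a (i + j) ' ') (PySem.List.pyGetD e j ' '))))
    = (if e.length = 0 then true
       else if a.length < e.length then false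
       else pvScan (pvMasks (pvClasses d e) e) (1 <<< (e.length - 1)) 0 a) := by
  rcases Nat.eq_zero_or_pos e.length with he | hm
  · rw [if_pos he, if_neg (by omega : ¬ (a.length : Int) < (e.length : Int))]
    rw [List.any_eq_true]
    refine ⟨0, ?_, ?_⟩
    · rw [PySem.List.mem_pyRange_one]; constructor <;> omega
    · rw [List.all_eq_true]
      intro j hj
      rw [PySem.List.mem_pyRange_one] at hj
      omega
  · rw [if_neg (by omega : ¬ e.length = 0)]
    by_cases hn : a.length < e.length
    · rw [if_pos (by exact_mod_cast hn), if_pos hn]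
    · rw [if_neg (by exact_mod_cast hn), if_neg hn]
      rw [Bool.eq_iff_iff, pv_any_iff,
          pv_scan_iff d hd a e hm a 0 0 (by simp) (pv_inv_zero d a e)]
      constructor
      · rintro ⟨i, hi, hall⟩
        refine ⟨i + e.length - 1, by omega, by omega, by omega, ?_⟩
        intro t ht
        have heq : i + e.length - 1 + 1 - e.length + t = i + t := by omega
        rw [heq]
        exact hall t ht
      · rintro ⟨q, -, hq2, hq3, hall⟩
        refine ⟨q + 1 - e.length, by omega, ?_⟩
        intro t ht
        exact hall t ht

-- ===== VERDICT (by name: the statement is the Claim_ definition above) =====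
theorem is_similar_spec : Claim_equal_is_similar := by
  intro actual expected similar_chars _
  unfold Spec_is_similar is_similar is_similar_alt
  exact (pv_main (PySem.Dict.ofList similar_chars) (PySem.Dict.nodup_keys_ofList _)
    (PySem.Chars.strip (PySem.Chars.upper actual.toList))
    (PySem.Chars.strip (PySem.Chars.upper expected.toList)))
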